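-- pv_equiv track=rewrite | github.com/contatoeltonmiranda-code/william-aromas-loja-preview | _apply_round23.py | split_singles_and_families
-- ===== SOURCE A (Python) =====
-- def split_singles_and_families(prods: list, family_keys: list) -> tuple:
--     families = {key: [] for key, _ in family_keys}
--     singles = []
--     for p in prods:
--         if p.get("placeholder"):
--             singles.append(p)
--             continue
--         matched = None
--         for key, _ in family_keys:
--             if key.lower() in p["title"].lower():
--                 matched = key
--                 break
--         if matched:
--             families[matched].append(p)
--         else:
--             singles.append(p)
--     return singles, families
-- ===== SOURCE B (Python) =====
-- def split_singles_and_families(prods: list, family_keys: list) -> tuple: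
--     # Key-major bucketing: each key, in order, claims the still-unassigned
--     # non-placeholder products whose title contains it (case-insensitive).
--     families = {}
--     for key, _ in family_keys:
--         families.setdefault(key, [])
--     pool = [(i, p) for i, p in enumerate(prods) if not p.get("placeholder")]
--     assigned = set()
--     for key, _ in family_keys:
--         kl = key.lower()
--         for i, p in pool:
--             if i not in assigned and kl in p["title"].lower():
--                 families[key].append(p)
--                 assigned.add(i)
--     singles = [p for i, p in enumerate(prods) if p.get("placeholder") or i not in assigned]
--     return singles, families
-- ===== Notes on version B (the rewrite author's own statement) =====
-- stated objective: alternative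
-- what changed: Inverts the loop nesting: instead of A's product-major scan that finds each product's first matching key and appends into a dict of buckets, B splits off an indexed pool of non-placeholder products and does a key-major pass in which each key, in its given order, claims the still-unassigned pool products whose lowercased title contains it, rebuilding singles at the end by original position.
-- intended difference: When some non-placeholder product's first (case-insensitive substring) matching key is the empty string, A's 'if matched:' treats the matched key '' as falsy and puts the product in singles leaving the '' bucket empty, while B files it under families[''] like any other first-matched key - the intended first-match bucketing. — e.g. on split_singles_and_families([[("title", "x")]], [("", "f")]): A returns ([[("title", "x")]], [("", [])]), B returns ([], [("", [[("title", "x")]])])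
import Mathlib
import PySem

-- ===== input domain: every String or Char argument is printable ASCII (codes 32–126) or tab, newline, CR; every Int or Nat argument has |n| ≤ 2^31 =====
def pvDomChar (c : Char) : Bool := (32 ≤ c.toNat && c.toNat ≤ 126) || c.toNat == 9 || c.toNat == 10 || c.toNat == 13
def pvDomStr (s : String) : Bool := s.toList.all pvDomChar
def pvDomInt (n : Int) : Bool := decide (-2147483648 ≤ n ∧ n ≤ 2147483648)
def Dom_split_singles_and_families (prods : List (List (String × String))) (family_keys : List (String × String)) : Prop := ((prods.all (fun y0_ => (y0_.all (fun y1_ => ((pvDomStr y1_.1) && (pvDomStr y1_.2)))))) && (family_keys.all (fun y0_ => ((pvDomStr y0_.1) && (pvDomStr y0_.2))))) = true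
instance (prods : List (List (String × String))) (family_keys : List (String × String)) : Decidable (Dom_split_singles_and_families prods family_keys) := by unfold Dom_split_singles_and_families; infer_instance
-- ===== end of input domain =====

-- B replaces A's product-major scan (first matching key per product, via a dict of buckets)
-- by a key-major bucketing pass over a pool of unassigned non-placeholder products ('alternative').

-- shared Python primitives (truthiness of an Optional[str], dict.get, the lowercased-substring match)
def pvTruthy (o : Option String) : Bool := o.getD "" != ""

def pvGet (p : List (String × String)) (k : String) : Option String :=
  (PySem.Dict.mk p).get? k

def pvMatch (key : String) (p : List (String × String)) : Bool :=
  PySem.Str.isIn (PySem.Str.lower key) (PySem.Str.lower ((pvGet p "title").getD ""))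

-- 'for key, _ in family_keys: if key.lower() in title.lower(): matched = key; break'
def pvFirstKey (family_keys : List (String × String)) (p : List (String × String)) : Option String :=
  (family_keys.find? (fun kv => pvMatch kv.1 p)).map (·.1)

-- ===== PORT A =====
def split_singles_and_families (prods : List (List (String × String))) (family_keys : List (String × String)) : (List (List (String × String))) × (List (String × List (List (String × String)))) :=
  -- families = {key: [] for key, _ in family_keys}
  let st := prods.foldl
    (fun (st : List (List (String × String)) × PySem.Dict String (List (List (String × String)))) p =>
      if pvTruthy (pvGet p "placeholder") then (st.1 ++ [p], st.2)
      else
        -- matched = first key whose lowercased form occurs in the lowercased title (None if no break)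
        if pvTruthy (pvFirstKey family_keys p) then
          (st.1, st.2.modify ((pvFirstKey family_keys p).getD "") [] (fun l => l ++ [p]))
        else (st.1 ++ [p], st.2))
    (([] : List (List (String × String))),
     family_keys.foldl (fun d kv => d.insert kv.1 []) PySem.Dict.empty)
  (st.1, st.2.items)

-- ===== PORT B =====
def split_singles_and_families_alt (prods : List (List (String × String))) (family_keys : List (String × String)) : (List (List (String × String))) × (List (String × List (List (String × String)))) :=
  -- families = {} + setdefault per key; pool = unassigned non-placeholder products with their indices
  let pool := (PySem.List.enumerate prods).filter (fun ip => !pvTruthy (pvGet ip.2 "placeholder"))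
  let fin := family_keys.foldl
    (fun (st : PySem.Dict String (List (List (String × String))) × PySem.Set Int) kv =>
      pool.foldl
        (fun (st : PySem.Dict String (List (List (String × String))) × PySem.Set Int) ip =>
          if !(PySem.Set.contains st.2 ip.1) && pvMatch kv.1 ip.2 then
            (st.1.modify kv.1 [] (fun l => l ++ [ip.2]), PySem.Set.add st.2 ip.1)
          else st)
        st)
    (family_keys.foldl (fun d kv => d.setdefault kv.1 []) PySem.Dict.empty,
     (PySem.Set.empty : PySem.Set Int))
  let singles := ((PySem.List.enumerate prods).filter
      (fun ip => pvTruthy (pvGet ip.2 "placeholder") || !(PySem.Set.contains fin.2 ip.1))).map (·.2)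
  (singles, fin.1.items)

-- ===== PRECONDITION & SPEC =====
-- Pre_ excludes exactly the inputs where Python A raises KeyError: some non-placeholder
-- product lacks a "title" key while family_keys is non-empty.
def Pre_split_singles_and_families (prods : List (List (String × String))) (family_keys : List (String × String)) : Prop :=
  family_keys = [] ∨ ∀ p ∈ prods, pvTruthy (pvGet p "placeholder") = true ∨ (pvGet p "title").isSome = true

instance (prods : List (List (String × String))) (family_keys : List (String × String)) : Decidable (Pre_split_singles_and_families prods family_keys) := by unfold Pre_split_singles_and_families; infer_instance

def pvWitness_split_singles_and_families : (List (List (String × String))) × (List (String × String)) :=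
  ([[("title", "Rose 50ml")], [("placeholder", "y")]], [("rose", "Rose family")])

-- On inputs where some non-placeholder product's first (case-insensitive substring) matching key
-- is the empty string, A's 'if matched:' treats the matched key '' as falsy and drops the product
-- into singles leaving the '' bucket empty, while B files it under families[''] like any other
-- first-matched key — the intended first-match bucketing.
def D_split_singles_and_families (prods : List (List (String × String))) (family_keys : List (String × String)) : Prop :=
  ∃ p ∈ prods, pvTruthy (pvGet p "placeholder") = false ∧ (pvGet p "title").isSome = true ∧
    pvFirstKey family_keys p = some ""

instance (prods : List (List (String × String))) (family_keys : List (String × String)) : Decidable (D_split_singles_and_families prods family_keys) := by unfold D_split_singles_and_families; infer_instance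

def Spec_split_singles_and_families (prods : List (List (String × String))) (family_keys : List (String × String)) (out : (List (List (String × String))) × (List (String × List (List (String × String))))) : Prop := ¬ D_split_singles_and_families prods family_keys → out = split_singles_and_families_alt prods family_keys
instance (prods : List (List (String × String))) (family_keys : List (String × String)) (out : (List (List (String × String))) × (List (String × List (List (String × String))))) : Decidable (Spec_split_singles_and_families prods family_keys out) := by unfold Spec_split_singles_and_families; infer_instance

def pvDiffWitness_split_singles_and_families : (List (List (String × String))) × (List (String × String)) :=
  ([[("title", "x")]], [("", "f")])

def pvDiffWitnessOut_split_singles_and_families : ((List (List (String × String))) × (List (String × List (List (String × String))))) × ((List (List (String × String))) × (List (String × List (List (String × String))))) :=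
  (([[("title", "x")]], [("", [])]), ([], [("", [[("title", "x")]])]))

-- ===== CLAIM (what is proved, stated in full; the proofs are below) =====
def Claim_unchanged_split_singles_and_families : Prop := ∀ (prods : List (List (String × String))) (family_keys : List (String × String)), Dom_split_singles_and_families prods family_keys → Pre_split_singles_and_families prods family_keys → Spec_split_singles_and_families prods family_keys (split_singles_and_families prods family_keys)
def Claim_changed_split_singles_and_families : Prop := Dom_split_singles_and_families (pvDiffWitness_split_singles_and_families.1) (pvDiffWitness_split_singles_and_families.2) ∧ Pre_split_singles_and_families (pvDiffWitness_split_singles_and_families.1) (pvDiffWitness_split_singles_and_families.2) ∧ D_split_singles_and_families (pvDiffWitness_split_singles_and_families.1) (pvDiffWitness_split_singles_and_families.2) ∧ split_singles_and_families (pvDiffWitness_split_singles_and_families.1) (pvDiffWitness_split_singles_and_families.2) = pvDiffWitnessOut_split_singles_and_families.1 ∧ split_singles_and_families_alt (pvDiffWitness_split_singles_and_families.1) (pvDiffWitness_split_singles_and_families.2) = pvDiffWitnessOut_split_singles_and_families.2 ∧ pvDiffWitnessOut_split_singles_and_families.1 ≠ pvDiffWitnessOut_split_singles_and_families.2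
def Claim_exact_split_singles_and_families : Prop := ∀ (prods : List (List (String × String))) (family_keys : List (String × String)), Dom_split_singles_and_families prods family_keys → Pre_split_singles_and_families prods family_keys → D_split_singles_and_families prods family_keys → split_singles_and_families prods family_keys ≠ split_singles_and_families_alt prods family_keys

-- ===== LEMMAS AND PROOFS =====

-- abbreviations used by the proofs only
def pvPh (p : List (String × String)) : Bool := pvTruthy (pvGet p "placeholder")
def pvQA (fk : List (String × String)) (p : List (String × String)) : Bool :=
  pvPh p || !pvTruthy (pvFirstKey fk p)
def pvQB (fk : List (String × String)) (p : List (String × String)) : Bool :=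
  pvPh p || !(pvFirstKey fk p).isSome
def pvBA (fk : List (String × String)) (p : List (String × String)) : Bool :=
  !pvPh p && pvTruthy (pvFirstKey fk p)
def pvAny (ks : List (String × String)) (p : List (String × String)) : Bool :=
  ks.any (fun kv => pvMatch kv.1 p)

-- ---- A side ----

lemma A_loop (fk : List (String × String)) (prods : List (List (String × String)))
    (s0 : List (List (String × String))) (d0 : PySem.Dict String (List (List (String × String)))) :
    prods.foldl
      (fun st p =>
        if pvTruthy (pvGet p "placeholder") then (st.1 ++ [p], st.2)
        else
          if pvTruthy (pvFirstKey fk p) then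
            (st.1, st.2.modify ((pvFirstKey fk p).getD "") [] (fun l => l ++ [p]))
          else (st.1 ++ [p], st.2)) (s0, d0)
    = (s0 ++ prods.filter (pvQA fk),
       prods.foldl (fun d p => if pvBA fk p then d.modify ((pvFirstKey fk p).getD "") [] (fun l => l ++ [p]) else d) d0) := by
  induction prods generalizing s0 d0 with
  | nil => simp
  | cons p tl ih =>
    simp only [List.foldl_cons, List.filter_cons]
    by_cases hp : pvTruthy (pvGet p "placeholder")
    · have hq : pvQA fk p = true := by simp [pvQA, pvPh, hp]
      have hb : pvBA fk p = false := by simp [pvBA, pvPh, hp]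
      rw [if_pos hp, ih, hq, hb]
      simp
    · by_cases hm : pvTruthy (pvFirstKey fk p)
      · have hq : pvQA fk p = false := by simp [pvQA, pvPh, hp, hm]
        have hb : pvBA fk p = true := by simp [pvBA, pvPh, hp, hm]
        rw [if_neg hp, if_pos hm, ih, hq, hb]
        simp
      · have hq : pvQA fk p = true := by simp [pvQA, pvPh, hp, hm]
        have hb : pvBA fk p = false := by simp [pvBA, pvPh, hp, hm]
        rw [if_neg hp, if_neg hm, ih, hq, hb]
        simp

lemma modfold_getD (l : List (List (String × String))) (key : List (String × String) → String)
    (b : List (String × String) → Bool) (d0 : PySem.Dict String (List (List (String × String)))) (k : String) :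
    (l.foldl (fun d p => if b p then d.modify (key p) [] (fun t => t ++ [p]) else d) d0).getD k []
      = d0.getD k [] ++ l.filter (fun p => b p && (key p == k)) := by
  induction l generalizing d0 with
  | nil => simp
  | cons p tl ih =>
    simp only [List.foldl_cons, List.filter_cons]
    by_cases hb : b p
    · rw [if_pos hb, ih]
      by_cases he : key p = k
      · subst he
        rw [PySem.Dict.getD_modify]
        simp [hb, List.append_assoc]
      · rw [PySem.Dict.getD_modify, if_neg (fun hc => he hc.symm)]
        have : (b p && (key p == k)) = false := by simp [he]
        simp [this]
    · rw [if_neg hb, ih]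
      have : (b p && (key p == k)) = false := by simp [hb]
      simp [this]

lemma modfold_keys (l : List (List (String × String))) (key : List (String × String) → String)
    (b : List (String × String) → Bool) (d0 : PySem.Dict String (List (List (String × String))))
    (h : ∀ p ∈ l, b p = true → d0.contains (key p) = true) :
    (l.foldl (fun d p => if b p then d.modify (key p) [] (fun t => t ++ [p]) else d) d0).keys = d0.keys := by
  induction l generalizing d0 with
  | nil => rfl
  | cons p tl ih =>
    simp only [List.foldl_cons]
    by_cases hb : b p
    · rw [if_pos hb]
      have hc : d0.contains (key p) = true := h p (by simp) hb
      have hkeys : (d0.modify (key p) [] (fun t => t ++ [p])).keys = d0.keys := by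
        rw [PySem.Dict.keys_modify, PySem.Dict.keys_insert_of_contains _ _ hc]
      rw [ih _ (fun q hq hbq => by
        rw [PySem.Dict.contains_modify]
        simp [h q (by simp [hq]) hbq]), hkeys]
    · rw [if_neg hb]
      exact ih _ (fun q hq hbq => h q (by simp [hq]) hbq)

-- ---- init dicts ----

lemma initA_keys (fk : List (String × String)) :
    (fk.foldl (fun d kv => d.insert kv.1 ([] : List (List (String × String)))) PySem.Dict.empty).keys
      = PySem.Set.ofList (fk.map (·.1)) := by
  rw [PySem.Dict.keys_foldl_insert_key fk (·.1) (fun _ _ => []) PySem.Dict.empty]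
  simp [PySem.Dict.keys_empty, PySem.Set.update, PySem.Set.ofList_eq_foldl]

lemma fold_insert_getD_nil (fk : List (String × String)) :
    ∀ (d : PySem.Dict String (List (List (String × String)))), (∀ k, d.getD k [] = []) →
      ∀ k, (fk.foldl (fun d kv => d.insert kv.1 ([] : List (List (String × String)))) d).getD k [] = [] := by
  induction fk with
  | nil => intro d h k; exact h k
  | cons kv tl ih =>
    intro d h k
    simp only [List.foldl_cons]
    refine ih _ (fun k' => ?_) k
    rw [PySem.Dict.getD_insert]
    split_ifs with h1
    · rfl
    · exact h k'

lemma initA_getD (fk : List (String × String)) (k : String) :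
    (fk.foldl (fun d kv => d.insert kv.1 ([] : List (List (String × String)))) PySem.Dict.empty).getD k [] = [] := by
  exact fold_insert_getD_nil fk PySem.Dict.empty (fun k' => PySem.Dict.getD_empty k' []) k

lemma initB_keys (fk : List (String × String)) :
    (fk.foldl (fun d kv => d.setdefault kv.1 ([] : List (List (String × String)))) PySem.Dict.empty).keys
      = PySem.Set.ofList (fk.map (·.1)) := by
  have gen : ∀ (l : List (String × String)) (d : PySem.Dict String (List (List (String × String)))),
      (l.foldl (fun d kv => d.setdefault kv.1 ([] : List (List (String × String)))) d).keys
        = PySem.Set.update d.keys (l.map (·.1)) := by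
    intro l
    induction l with
    | nil => intro d; simp [PySem.Set.update]
    | cons kv tl ih =>
      intro d
      simp only [List.foldl_cons, List.map_cons]
      rw [ih]
      have hupd : PySem.Set.update d.keys (kv.1 :: tl.map (·.1))
          = PySem.Set.update (PySem.Set.add d.keys kv.1) (tl.map (·.1)) := by
        simp [PySem.Set.update]
      rw [hupd]
      congr 1
      rw [PySem.Dict.keys_setdefault]
      by_cases hm : kv.1 ∈ d.keys
      · rw [if_pos ((PySem.Dict.contains_iff_mem_keys d kv.1).mpr hm)]
        simp [PySem.Set.add, hm]
      · rw [if_neg (by simp [PySem.Dict.contains_iff_mem_keys, hm])]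
        simp [PySem.Set.add, hm]
  rw [gen fk PySem.Dict.empty]
  simp [PySem.Dict.keys_empty, PySem.Set.update, PySem.Set.ofList_eq_foldl]

lemma initB_getD (fk : List (String × String)) (k : String) :
    (fk.foldl (fun d kv => d.setdefault kv.1 ([] : List (List (String × String)))) PySem.Dict.empty).getD k [] = [] := by
  have gen : ∀ (l : List (String × String)) (d : PySem.Dict String (List (List (String × String)))),
      (∀ k, d.getD k [] = []) →
      ∀ k, (l.foldl (fun d kv => d.setdefault kv.1 ([] : List (List (String × String)))) d).getD k [] = [] := by
    intro l
    induction l with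
    | nil => intro d h k; exact h k
    | cons kv tl ih =>
      intro d h k
      simp only [List.foldl_cons]
      refine ih _ (fun k' => ?_) k
      by_cases he : k' = kv.1
      · subst he
        rw [PySem.Dict.getD_setdefault_self]
        exact h _
      · rw [PySem.Dict.getD_eq_get?_getD, PySem.Dict.get?_setdefault_of_ne _ _ he,
            ← PySem.Dict.getD_eq_get?_getD]
        exact h k'
  exact gen fk PySem.Dict.empty (fun k' => PySem.Dict.getD_empty k' []) k

-- ---- B side ----

lemma set_contains_add (a : PySem.Set Int) (x y : Int) :
    PySem.Set.contains (PySem.Set.add a x) y = (PySem.Set.contains a y || y == x) := by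
  by_cases hx : PySem.Set.contains a x
  · simp only [PySem.Set.add, hx, if_true]
    by_cases hyx : y = x <;> simp_all [PySem.Set.contains]
  · simp only [PySem.Set.add, hx]
    simp [PySem.Set.contains]
    by_cases hyx : y = x <;> simp_all

lemma B_inner (kv : String × String) (pl : List (Int × List (String × String)))
    (f : PySem.Dict String (List (List (String × String)))) (a : PySem.Set Int)
    (Q : List (String × String) → Bool)
    (hnd : (pl.map (·.1)).Nodup)
    (ha : ∀ ip ∈ pl, PySem.Set.contains a ip.1 = Q ip.2)
    (hk : f.contains kv.1 = true) :
    (pl.foldl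
        (fun (st : PySem.Dict String (List (List (String × String))) × PySem.Set Int) ip =>
          if !(PySem.Set.contains st.2 ip.1) && pvMatch kv.1 ip.2 then
            (st.1.modify kv.1 [] (fun l => l ++ [ip.2]), PySem.Set.add st.2 ip.1)
          else st) (f, a))
      = ((pl.foldl (fun g ip => if !Q ip.2 && pvMatch kv.1 ip.2 then g.modify kv.1 [] (fun l => l ++ [ip.2]) else g) f),
         (pl.foldl (fun s ip => if !Q ip.2 && pvMatch kv.1 ip.2 then PySem.Set.add s ip.1 else s) a)) := by
  induction pl generalizing f a with
  | nil => rfl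
  | cons ip tl ih =>
    simp only [List.foldl_cons]
    have hc : PySem.Set.contains a ip.1 = Q ip.2 := ha ip (by simp)
    have hnd' : (tl.map (·.1)).Nodup := (List.nodup_cons.mp (by simpa using hnd)).2
    have hni : ip.1 ∉ tl.map (·.1) := (List.nodup_cons.mp (by simpa using hnd)).1
    rw [hc]
    by_cases hcond : (!Q ip.2 && pvMatch kv.1 ip.2) = true
    · rw [if_pos hcond, if_pos hcond, if_pos hcond]
      refine ih _ _ hnd' (fun jp hjp => ?_) (by rw [PySem.Dict.contains_modify]; simp)
      rw [set_contains_add]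
      have hne : (jp.1 == ip.1) = false := by
        simp only [beq_eq_false_iff_ne, ne_eq]
        intro he
        exact hni (he ▸ List.mem_map_of_mem hjp)
      rw [hne, Bool.or_false]
      exact ha jp (by simp [hjp])
    · rw [if_neg hcond, if_neg hcond, if_neg hcond]
      exact ih _ _ hnd' (fun jp hjp => ha jp (by simp [hjp])) hk

lemma B_inner_getD (kv : String × String) (pl : List (Int × List (String × String)))
    (f : PySem.Dict String (List (List (String × String))))
    (Q : List (String × String) → Bool) (k : String) :
    (pl.foldl (fun g ip => if !Q ip.2 && pvMatch kv.1 ip.2 then g.modify kv.1 [] (fun l => l ++ [ip.2]) else g) f).getD k []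
      = f.getD k [] ++ (if k = kv.1 then (pl.filter (fun ip => !Q ip.2 && pvMatch kv.1 ip.2)).map (·.2) else []) := by
  induction pl generalizing f with
  | nil => simp
  | cons ip tl ih =>
    simp only [List.foldl_cons, List.filter_cons]
    by_cases hcond : (!Q ip.2 && pvMatch kv.1 ip.2) = true
    · rw [if_pos hcond, ih]
      by_cases he : k = kv.1
      · subst he
        rw [PySem.Dict.getD_modify, if_pos rfl]
        simp [hcond, List.append_assoc]
      · rw [PySem.Dict.getD_modify, if_neg he]
        simp [he]
    · rw [if_neg hcond, ih]
      simp [hcond]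

lemma B_inner_keys (kv : String × String) (pl : List (Int × List (String × String)))
    (f : PySem.Dict String (List (List (String × String))))
    (Q : List (String × String) → Bool) (hk : f.contains kv.1 = true) :
    (pl.foldl (fun g ip => if !Q ip.2 && pvMatch kv.1 ip.2 then g.modify kv.1 [] (fun l => l ++ [ip.2]) else g) f).keys
      = f.keys := by
  induction pl generalizing f with
  | nil => rfl
  | cons ip tl ih =>
    simp only [List.foldl_cons]
    by_cases hcond : (!Q ip.2 && pvMatch kv.1 ip.2) = true
    · rw [if_pos hcond]
      have hkeys : (f.modify kv.1 [] (fun l => l ++ [ip.2])).keys = f.keys := by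
        rw [PySem.Dict.keys_modify, PySem.Dict.keys_insert_of_contains _ _ hk]
      rw [ih _ (by rw [PySem.Dict.contains_modify]; simp), hkeys]
    · rw [if_neg hcond]
      exact ih _ hk

lemma B_inner_contains (kv : String × String) (pl : List (Int × List (String × String)))
    (a : PySem.Set Int) (Q : List (String × String) → Bool) (j : Int) :
    PySem.Set.contains (pl.foldl (fun s ip => if !Q ip.2 && pvMatch kv.1 ip.2 then PySem.Set.add s ip.1 else s) a) j
      = (PySem.Set.contains a j || pl.any (fun ip => ip.1 == j && (!Q ip.2 && pvMatch kv.1 ip.2))) := by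
  induction pl generalizing a with
  | nil => simp
  | cons ip tl ih =>
    simp only [List.foldl_cons, List.any_cons]
    by_cases hcond : (!Q ip.2 && pvMatch kv.1 ip.2) = true
    · rw [if_pos hcond, ih, set_contains_add, hcond]
      by_cases hj : ip.1 = j
      · subst hj
        cases PySem.Set.contains a ip.1 <;> simp
      · have h1 : (j == ip.1) = false := by simp [Ne.symm hj]
        have h2 : (ip.1 == j) = false := by simp [hj]
        simp [h1, h2]
    · rw [if_neg hcond, ih]
      have : ∀ b : Bool, (b && (!Q ip.2 && pvMatch kv.1 ip.2)) = false := by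
        intro b; cases b <;> simp_all
      simp [this]

lemma pvFirstKey_cons (kv : String × String) (l : List (String × String)) (p : List (String × String)) :
    pvFirstKey (kv :: l) p = if pvMatch kv.1 p then some kv.1 else pvFirstKey l p := by
  by_cases h : pvMatch kv.1 p <;> simp [pvFirstKey, h]

lemma pvAny_eq_isSome (l : List (String × String)) (p : List (String × String)) :
    pvAny l p = (pvFirstKey l p).isSome := by
  induction l with
  | nil => simp [pvAny, pvFirstKey]
  | cons kv tl ih =>
    by_cases h : pvMatch kv.1 p
    · simp [pvAny, pvFirstKey_cons, h]
    · simp only [pvAny, List.any_cons, h, Bool.false_or, pvFirstKey_cons]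
      exact ih

lemma pvFirstKey_match {l : List (String × String)} {p : List (String × String)} {s : String}
    (h : pvFirstKey l p = some s) : pvMatch s p = true := by
  unfold pvFirstKey at h
  rcases Option.map_eq_some_iff.mp h with ⟨kvx, hfind, hfst⟩
  have := List.find?_some hfind
  rwa [hfst] at this

lemma pvAny_append (l₁ l₂ : List (String × String)) (p : List (String × String)) :
    pvAny (l₁ ++ l₂) p = (pvAny l₁ p || pvAny l₂ p) := by
  simp [pvAny]

lemma B_outer (pool : List (Int × List (String × String)))
    (hnd : (pool.map (·.1)).Nodup)
    (hinj : ∀ ip ∈ pool, ∀ jp ∈ pool, ip.1 = jp.1 → ip.2 = jp.2) :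
    ∀ (rest ks : List (String × String)) (f : PySem.Dict String (List (List (String × String)))) (a : PySem.Set Int),
      (∀ ip ∈ pool, PySem.Set.contains a ip.1 = pvAny ks ip.2) →
      (∀ kv ∈ rest, f.contains kv.1 = true) →
      (let r := rest.foldl
          (fun (st : PySem.Dict String (List (List (String × String))) × PySem.Set Int) kv =>
            pool.foldl
              (fun (st : PySem.Dict String (List (List (String × String))) × PySem.Set Int) ip =>
                if !(PySem.Set.contains st.2 ip.1) && pvMatch kv.1 ip.2 then
                  (st.1.modify kv.1 [] (fun l => l ++ [ip.2]), PySem.Set.add st.2 ip.1)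
                else st) st) (f, a)
       r.1.keys = f.keys ∧
       (∀ k, r.1.getD k [] = f.getD k [] ++ (pool.filter (fun ip => !pvAny ks ip.2 && (pvFirstKey rest ip.2 == some k))).map (·.2)) ∧
       (∀ ip ∈ pool, PySem.Set.contains r.2 ip.1 = pvAny (ks ++ rest) ip.2)) := by
  intro rest
  induction rest with
  | nil =>
    intro ks f a ha hf
    refine ⟨rfl, fun k => ?_, fun ip hip => by simpa using ha ip hip⟩
    simp [pvFirstKey]
  | cons kv rest' ih =>
    intro ks f a ha hf
    simp only [List.foldl_cons]
    rw [B_inner kv pool f a (pvAny ks) hnd ha (hf kv (by simp))]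
    have hcontains1 : ∀ ip ∈ pool,
        PySem.Set.contains (pool.foldl (fun s ip => if !pvAny ks ip.2 && pvMatch kv.1 ip.2 then PySem.Set.add s ip.1 else s) a) ip.1
          = pvAny (ks ++ [kv]) ip.2 := by
      intro ip hip
      rw [B_inner_contains, ha ip hip]
      have hany : pool.any (fun jp => jp.1 == ip.1 && (!pvAny ks jp.2 && pvMatch kv.1 jp.2))
          = (!pvAny ks ip.2 && pvMatch kv.1 ip.2) := by
        rw [Bool.eq_iff_iff]
        constructor
        · intro h
          rcases List.any_eq_true.mp h with ⟨jp, hjp, hj⟩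
          simp only [Bool.and_eq_true, beq_iff_eq] at hj
          obtain ⟨hjeq, hc1, hc2⟩ := hj
          have he2 : jp.2 = ip.2 := hinj jp hjp ip hip hjeq
          rw [he2] at hc1 hc2
          simp [hc1, hc2]
        · intro h
          exact List.any_eq_true.mpr ⟨ip, hip, by simp [h]⟩
      rw [hany, pvAny_append]
      have : pvAny [kv] ip.2 = pvMatch kv.1 ip.2 := by simp [pvAny]
      rw [this]
      cases h1 : pvAny ks ip.2 <;> simp
    have hf1 : ∀ kv' ∈ rest',
        (pool.foldl (fun g ip => if !pvAny ks ip.2 && pvMatch kv.1 ip.2 then g.modify kv.1 [] (fun l => l ++ [ip.2]) else g) f).contains kv'.1 = true := by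
      intro kv' hkv'
      rw [PySem.Dict.contains_iff_mem_keys, B_inner_keys kv pool f (pvAny ks) (hf kv (by simp)),
          ← PySem.Dict.contains_iff_mem_keys]
      exact hf kv' (by simp [hkv'])
    rcases ih (ks ++ [kv]) _ _ hcontains1 hf1 with ⟨hkeys, hgetD, hcont⟩
    refine ⟨?_, ?_, ?_⟩
    · rw [hkeys, B_inner_keys kv pool f (pvAny ks) (hf kv (by simp))]
    · intro k
      rw [hgetD k, B_inner_getD]
      by_cases hk : k = kv.1
      · subst hk
        rw [if_pos rfl]
        have hY : pool.filter (fun ip => !pvAny (ks ++ [kv]) ip.2 && (pvFirstKey rest' ip.2 == some kv.1)) = [] := by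
          rw [List.filter_eq_nil_iff]
          intro ip hip h
          rcases (by simpa using h : pvAny (ks ++ [kv]) ip.2 = false ∧ pvFirstKey rest' ip.2 = some kv.1) with ⟨hna, hfk⟩
          have hm := pvFirstKey_match hfk
          rw [pvAny_append] at hna
          have hone : pvAny [kv] ip.2 = true := by simp [pvAny, hm]
          simp [hone] at hna
        have hZ : pool.filter (fun ip => !pvAny ks ip.2 && (pvFirstKey (kv :: rest') ip.2 == some kv.1))
            = pool.filter (fun ip => !pvAny ks ip.2 && pvMatch kv.1 ip.2) := by
          apply List.filter_congr
          intro ip hip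
          rw [pvFirstKey_cons]
          by_cases hm : pvMatch kv.1 ip.2
          · simp [hm]
          · rw [if_neg hm]
            have hne : (pvFirstKey rest' ip.2 == some kv.1) = false := by
              rw [beq_eq_false_iff_ne]
              intro hfk
              exact hm (pvFirstKey_match hfk)
            simp [hm, hne]
        rw [hY, hZ]
        simp
      · rw [if_neg hk]
        have hW : pool.filter (fun ip => !pvAny (ks ++ [kv]) ip.2 && (pvFirstKey rest' ip.2 == some k))
            = pool.filter (fun ip => !pvAny ks ip.2 && (pvFirstKey (kv :: rest') ip.2 == some k)) := by
          apply List.filter_congr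
          intro ip hip
          rw [pvFirstKey_cons, pvAny_append]
          by_cases hm : pvMatch kv.1 ip.2
          · have h1 : pvAny [kv] ip.2 = true := by simp [pvAny, hm]
            have h2 : (some kv.1 == some k) = false := by
              rw [beq_eq_false_iff_ne]
              simp [Ne.symm hk]
            simp [hm, h1, h2]
          · have h1 : pvAny [kv] ip.2 = false := by simp [pvAny, hm]
            simp [hm, h1]
        rw [hW]
        simp
    · intro ip hip
      rw [hcont ip hip]
      simp


-- ---- generic enumerate/filter lemmas ----

lemma enumerate_filter_map (xs : List (List (String × String))) (h : List (String × String) → Bool) :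
    ∀ s : Int, (((PySem.List.enumerate xs s).filter (fun ip => h ip.2)).map (·.2)) = xs.filter h := by
  induction xs with
  | nil => intro s; simp [PySem.List.enumerate]
  | cons x tl ih =>
    intro s
    rw [PySem.List.enumerate_cons]
    simp only [List.filter_cons]
    by_cases hh : h x <;> simp [hh, ih (s + 1)]

lemma countP_strict (l : List (List (String × String))) (p q : List (String × String) → Bool)
    (himp : ∀ x ∈ l, p x = true → q x = true)
    (x : List (String × String)) (hx : x ∈ l) (hqx : q x = true) (hpx : p x = false) :
    (l.filter p).length < (l.filter q).length := by
  have mono : ∀ (t : List (List (String × String))), (∀ x ∈ t, p x = true → q x = true) →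
      (t.filter p).length ≤ (t.filter q).length := by
    intro t
    induction t with
    | nil => intro _; simp
    | cons y tl ih =>
      intro h
      simp only [List.filter_cons]
      by_cases hpy : p y
      · rw [if_pos hpy, if_pos (h y (by simp) hpy)]
        simpa using ih (fun x hx => h x (by simp [hx]))
      · rw [if_neg hpy]
        refine le_trans (ih (fun x hx => h x (by simp [hx]))) ?_
        by_cases hqy : q y <;> simp [hqy]
  induction l with
  | nil => cases hx
  | cons y tl ih =>
    simp only [List.filter_cons]
    rcases List.mem_cons.mp hx with rfl | hmem
    · rw [hpx, hqx]
      simp only [Bool.false_eq_true, if_false, if_true, List.length_cons]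
      exact Nat.lt_succ_of_le (mono tl (fun x hxm hpxm => himp x (by simp [hxm]) hpxm))
    · by_cases hpy : p y
      · rw [if_pos hpy, if_pos (himp y (by simp) hpy)]
        simpa using ih (fun x hxm hpxm => himp x (by simp [hxm]) hpxm) hmem
      · rw [if_neg hpy]
        refine lt_of_lt_of_le (ih (fun x hxm hpxm => himp x (by simp [hxm]) hpxm) hmem) ?_
        by_cases hqy : q y <;> simp [hqy]

-- ---- top-level characterizations ----

lemma A_char (prods : List (List (String × String))) (fk : List (String × String)) :
    split_singles_and_families prods fk
      = (prods.filter (pvQA fk),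
         (PySem.Set.ofList (fk.map (·.1))).map (fun k =>
           (k, prods.filter (fun p => pvBA fk p && ((pvFirstKey fk p).getD "" == k))))) := by
  unfold split_singles_and_families
  have hkeys0 := initA_keys fk
  have hnd0 : (fk.foldl (fun d kv => d.insert kv.1 ([] : List (List (String × String)))) PySem.Dict.empty).keys.Nodup := by
    rw [hkeys0]; exact PySem.Set.nodup_ofList _
  have hcont0 : ∀ p ∈ prods, pvBA fk p = true →
      (fk.foldl (fun d kv => d.insert kv.1 ([] : List (List (String × String)))) PySem.Dict.empty).contains ((pvFirstKey fk p).getD "") = true := by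
    intro p hp hb
    cases hfk : pvFirstKey fk p with
    | none => rw [pvBA, hfk] at hb; simp [pvTruthy] at hb
    | some s =>
      rw [PySem.Dict.contains_iff_mem_keys, hkeys0, PySem.Set.mem_ofList]
      have hmem : s ∈ fk.map (·.1) := by
        unfold pvFirstKey at hfk
        rcases Option.map_eq_some_iff.mp hfk with ⟨kvx, hfind, hfst⟩
        exact hfst ▸ List.mem_map_of_mem (List.mem_of_find?_eq_some hfind)
      simpa [hfk] using hmem
  rw [A_loop fk prods]
  show (([] : List (List (String × String))) ++ prods.filter (pvQA fk),
      (prods.foldl (fun d p => if pvBA fk p then d.modify ((pvFirstKey fk p).getD "") [] (fun l => l ++ [p]) else d)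
        (fk.foldl (fun d kv => d.insert kv.1 []) PySem.Dict.empty)).items) = _
  have hkeysM := modfold_keys prods (fun p => (pvFirstKey fk p).getD "") (pvBA fk)
    (fk.foldl (fun d kv => d.insert kv.1 []) PySem.Dict.empty) hcont0
  dsimp only at hkeysM
  have hndM := hkeysM ▸ hnd0
  refine Prod.ext (by simp) ?_
  rw [PySem.Dict.items_eq_map_keys _ hndM ([] : List (List (String × String))), hkeysM, hkeys0]
  refine List.map_congr_left (fun k _ => ?_)
  have hg := modfold_getD prods (fun p => (pvFirstKey fk p).getD "") (pvBA fk)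
    (fk.foldl (fun d kv => d.insert kv.1 []) PySem.Dict.empty) k
  rw [hg, initA_getD]
  simp

lemma B_char (prods : List (List (String × String))) (fk : List (String × String)) :
    split_singles_and_families_alt prods fk
      = (prods.filter (pvQB fk),
         (PySem.Set.ofList (fk.map (·.1))).map (fun k =>
           (k, prods.filter (fun p => !pvPh p && (pvFirstKey fk p == some k))))) := by
  unfold split_singles_and_families_alt
  have hkeys0 := initB_keys fk
  have hpoolsub : ∀ ip ∈ (PySem.List.enumerate prods 0).filter (fun ip => !pvTruthy (pvGet ip.2 "placeholder")),
      ip ∈ PySem.List.enumerate prods 0 := fun ip hip => List.mem_of_mem_filter hip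
  have hinj : ∀ ip ∈ (PySem.List.enumerate prods 0).filter (fun ip => !pvTruthy (pvGet ip.2 "placeholder")),
      ∀ jp ∈ (PySem.List.enumerate prods 0).filter (fun ip => !pvTruthy (pvGet ip.2 "placeholder")),
      ip.1 = jp.1 → ip.2 = jp.2 := by
    intro ip hip jp hjp he
    rcases (PySem.List.mem_enumerate_iff _ _ _).mp (hpoolsub ip hip) with ⟨k1, hk1, hip1⟩
    rcases (PySem.List.mem_enumerate_iff _ _ _).mp (hpoolsub jp hjp) with ⟨k2, hk2, hjp1⟩
    subst hip1; subst hjp1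
    simp only at he ⊢
    have : k1 = k2 := by omega
    subst this; rfl
  have hnd : (((PySem.List.enumerate prods 0).filter (fun ip => !pvTruthy (pvGet ip.2 "placeholder"))).map (·.1)).Nodup := by
    have hpw : ((PySem.List.enumerate prods 0).filter (fun ip => !pvTruthy (pvGet ip.2 "placeholder"))).Pairwise (fun p q => p.1 < q.1) :=
      (PySem.List.pairwise_lt_enumerate prods 0).sublist List.filter_sublist
    exact List.pairwise_map.mpr (hpw.imp (fun h => Int.ne_of_lt h))
  have hb := B_outer ((PySem.List.enumerate prods 0).filter (fun ip => !pvTruthy (pvGet ip.2 "placeholder"))) hnd hinj fk []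
      (fk.foldl (fun d kv => d.setdefault kv.1 []) PySem.Dict.empty) PySem.Set.empty
      (fun ip _ => by simp [pvAny, PySem.Set.contains, PySem.Set.empty])
      (fun kv hkv => by
        rw [PySem.Dict.contains_iff_mem_keys, hkeys0, PySem.Set.mem_ofList]
        exact List.mem_map_of_mem hkv)
  rcases hb with ⟨hkeysF, hgetDF, hcontF⟩
  suffices hgen : ∀ z : PySem.Dict String (List (List (String × String))) × PySem.Set Int,
      z = (fk.foldl
      (fun (st : PySem.Dict String (List (List (String × String))) × PySem.Set Int) kv =>
        ((PySem.List.enumerate prods 0).filter (fun ip => !pvTruthy (pvGet ip.2 "placeholder"))).foldl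
          (fun (st : PySem.Dict String (List (List (String × String))) × PySem.Set Int) ip =>
            if !(PySem.Set.contains st.2 ip.1) && pvMatch kv.1 ip.2 then
              (st.1.modify kv.1 [] (fun l => l ++ [ip.2]), PySem.Set.add st.2 ip.1)
            else st) st)
      (fk.foldl (fun d kv => d.setdefault kv.1 []) PySem.Dict.empty, (PySem.Set.empty : PySem.Set Int))) →
      ((((PySem.List.enumerate prods 0).filter
          (fun ip => pvTruthy (pvGet ip.2 "placeholder") || !(PySem.Set.contains z.2 ip.1))).map (·.2)),
        z.1.items)
      = (prods.filter (pvQB fk),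
         (PySem.Set.ofList (fk.map (·.1))).map (fun k =>
           (k, prods.filter (fun p => !pvPh p && (pvFirstKey fk p == some k))))) by
    exact hgen _ rfl
  intro z hz
  subst hz
  refine Prod.ext ?_ ?_
  · show (((PySem.List.enumerate prods 0).filter _).map _) = _
    have hs : ((PySem.List.enumerate prods 0).filter
          (fun ip => pvTruthy (pvGet ip.2 "placeholder") || !(PySem.Set.contains (fk.foldl
      (fun (st : PySem.Dict String (List (List (String × String))) × PySem.Set Int) kv =>
        ((PySem.List.enumerate prods 0).filter (fun ip => !pvTruthy (pvGet ip.2 "placeholder"))).foldl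
          (fun (st : PySem.Dict String (List (List (String × String))) × PySem.Set Int) ip =>
            if !(PySem.Set.contains st.2 ip.1) && pvMatch kv.1 ip.2 then
              (st.1.modify kv.1 [] (fun l => l ++ [ip.2]), PySem.Set.add st.2 ip.1)
            else st) st)
      (fk.foldl (fun d kv => d.setdefault kv.1 []) PySem.Dict.empty, (PySem.Set.empty : PySem.Set Int))).2 ip.1)))
        = ((PySem.List.enumerate prods 0).filter (fun ip => pvQB fk ip.2)) := by
      apply List.filter_congr
      intro ip hip
      by_cases hph : pvTruthy (pvGet ip.2 "placeholder")
      · simp [pvQB, pvPh, hph]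
      · have hipool : ip ∈ ((PySem.List.enumerate prods 0).filter (fun ip => !pvTruthy (pvGet ip.2 "placeholder"))) := List.mem_filter.mpr ⟨hip, by simp [hph]⟩
        rw [hcontF ip hipool]
        rw [List.nil_append, pvAny_eq_isSome]
        simp [pvQB, pvPh, hph]
    rw [hs, enumerate_filter_map]
  · show (fk.foldl
      (fun (st : PySem.Dict String (List (List (String × String))) × PySem.Set Int) kv =>
        ((PySem.List.enumerate prods 0).filter (fun ip => !pvTruthy (pvGet ip.2 "placeholder"))).foldl
          (fun (st : PySem.Dict String (List (List (String × String))) × PySem.Set Int) ip =>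
            if !(PySem.Set.contains st.2 ip.1) && pvMatch kv.1 ip.2 then
              (st.1.modify kv.1 [] (fun l => l ++ [ip.2]), PySem.Set.add st.2 ip.1)
            else st) st)
      (fk.foldl (fun d kv => d.setdefault kv.1 []) PySem.Dict.empty, (PySem.Set.empty : PySem.Set Int))).1.items = _
    have hndK : (fk.foldl
      (fun (st : PySem.Dict String (List (List (String × String))) × PySem.Set Int) kv =>
        ((PySem.List.enumerate prods 0).filter (fun ip => !pvTruthy (pvGet ip.2 "placeholder"))).foldl
          (fun (st : PySem.Dict String (List (List (String × String))) × PySem.Set Int) ip =>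
            if !(PySem.Set.contains st.2 ip.1) && pvMatch kv.1 ip.2 then
              (st.1.modify kv.1 [] (fun l => l ++ [ip.2]), PySem.Set.add st.2 ip.1)
            else st) st)
      (fk.foldl (fun d kv => d.setdefault kv.1 []) PySem.Dict.empty, (PySem.Set.empty : PySem.Set Int))).1.keys.Nodup := by
      rw [hkeysF, hkeys0]; exact PySem.Set.nodup_ofList _
    rw [PySem.Dict.items_eq_map_keys _ hndK ([] : List (List (String × String))), hkeysF, hkeys0]
    refine List.map_congr_left (fun k _ => ?_)
    rw [hgetDF k, initB_getD]
    have h1 : ((PySem.List.enumerate prods 0).filter (fun ip => !pvTruthy (pvGet ip.2 "placeholder"))).filter (fun ip => !pvAny [] ip.2 && (pvFirstKey fk ip.2 == some k))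
        = ((PySem.List.enumerate prods 0).filter (fun ip => !pvTruthy (pvGet ip.2 "placeholder"))).filter (fun ip => pvFirstKey fk ip.2 == some k) :=
      List.filter_congr (by intro ip _; simp [pvAny])
    rw [h1, List.filter_filter]
    have h2 : (PySem.List.enumerate prods 0).filter
          (fun ip => (pvFirstKey fk ip.2 == some k) && !pvTruthy (pvGet ip.2 "placeholder"))
        = (PySem.List.enumerate prods 0).filter (fun ip => !pvPh ip.2 && (pvFirstKey fk ip.2 == some k)) :=
      List.filter_congr (by
        intro ip _
        rw [pvPh]
        cases pvFirstKey fk ip.2 == some k <;> cases pvTruthy (pvGet ip.2 "placeholder") <;> rfl)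
    rw [h2, enumerate_filter_map prods (fun p => !pvPh p && (pvFirstKey fk p == some k)) 0]
    simp

lemma no_empty_first (prods : List (List (String × String))) (fk : List (String × String))
    (hpre : Pre_split_singles_and_families prods fk)
    (hnd : ¬ D_split_singles_and_families prods fk) :
    ∀ p ∈ prods, pvPh p = false → pvFirstKey fk p ≠ some "" := by
  intro p hp hph hfk
  rcases hpre with hnil | hall
  · subst hnil
    simp [pvFirstKey] at hfk
  · rcases hall p hp with hph' | htitle
    · rw [pvPh] at hph
      rw [hph] at hph'
      cases hph'
    · exact hnd ⟨p, hp, hph, htitle, hfk⟩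

-- ===== VERDICT (by name: the statement is the Claim_ definition above) =====
theorem split_singles_and_families_spec : Claim_unchanged_split_singles_and_families := by
  intro prods fk _ hpre
  unfold Spec_split_singles_and_families
  intro hnd
  have hkey := no_empty_first prods fk hpre hnd
  rw [A_char, B_char]
  refine Prod.ext ?_ ?_
  · apply List.filter_congr
    intro p hp
    by_cases hph : pvPh p
    · simp [pvQA, pvQB, pvPh] at hph ⊢
      simp [hph]
    · cases hfk : pvFirstKey fk p with
      | none => simp [pvQA, pvQB, pvPh] at hph ⊢; simp [hfk, pvTruthy]
      | some s =>
        have hs : s ≠ "" := fun he => hkey p hp (by simpa using hph) (he ▸ hfk)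
        simp [pvQA, pvQB, pvPh] at hph ⊢
        simp [hfk, pvTruthy, hs]
  · refine List.map_congr_left (fun k _ => ?_)
    refine congrArg _ ?_
    apply List.filter_congr
    intro p hp
    by_cases hph : pvPh p
    · simp [pvBA, hph]
    · cases hfk : pvFirstKey fk p with
      | none => simp [pvBA, hph, hfk, pvTruthy]
      | some s =>
        have hph' : pvPh p = false := by simpa using hph
        have hs : s ≠ "" := fun he => hkey p hp hph' (he ▸ hfk)
        by_cases hsk : s = k
        · subst hsk; simp [pvBA, hph', hfk, pvTruthy, hs]
        · simp [pvBA, hph', hfk, pvTruthy, hs, hsk]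

theorem split_singles_and_families_changed : Claim_changed_split_singles_and_families := by
  unfold Claim_changed_split_singles_and_families
  refine ⟨by decide, by decide, by decide, by decide, by decide, by decide⟩

theorem split_singles_and_families_tight : Claim_exact_split_singles_and_families := by
  intro prods fk _ _ hd heq
  rw [A_char, B_char] at heq
  have h1 := congrArg Prod.fst heq
  simp only at h1
  obtain ⟨p, hp, hph, _, hfk⟩ := hd
  have himp : ∀ x ∈ prods, pvQB fk x = true → pvQA fk x = true := by
    intro x _ hqb
    rcases Bool.or_eq_true _ _ ▸ hqb with h | h
    · simp [pvQA, pvPh]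
      simp [pvPh] at h
      simp [h]
    · simp only [Bool.not_eq_true'] at h
      have : pvFirstKey fk x = none := by
        cases hc : pvFirstKey fk x
        · rfl
        · rw [hc] at h; simp at h
      simp [pvQA, this, pvTruthy]
  have hqa : pvQA fk p = true := by
    simp [pvQA, hfk, pvTruthy, pvPh]
  have hqb : pvQB fk p = false := by
    simp [pvQB, hfk, pvPh, hph]
  have hlt := countP_strict prods (pvQB fk) (pvQA fk) himp p hp hqa hqb
  rw [h1] at hlt
  omega
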